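-- pv_equiv track=rewrite | github.com/rmnldwg/icd | tests/base_test.py | count_identical_seq
-- ===== SOURCE A (Python) =====
-- def count_identical_seq(raw_list):
--     """
--     Count for each element how many preceeding elements are identical
--     """
--     last = None
--     res = [1] * len(raw_list)
--     for i, element in enumerate(raw_list):
--         if last is not None and last == element:
--             count += 1
--             res[i] = count
--         else:
--             count = 1
--         last = element
--     return res
-- ===== SOURCE B (Python) =====
-- def count_identical_seq(raw_list):
--     """
--     Count for each element how many preceeding elements are identical
--     """
--     res = []
--     i = 0
--     n = len(raw_list)
--     while i < n:
--         j = i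
--         while j < n and raw_list[j] == raw_list[i]:
--             j += 1
--         res.extend(range(1, j - i + 1))
--         i = j
--     return res
-- ===== Notes on version B (the rewrite author's own statement) =====
-- stated objective: alternative
-- what changed: Replaces A's single stateful scan (carrying last element and a running counter, writing into a pre-filled [1]*n list) with a run-based algorithm: find each maximal run of equal consecutive elements and extend the output with range(1, run_length+1).
import Mathlib
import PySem

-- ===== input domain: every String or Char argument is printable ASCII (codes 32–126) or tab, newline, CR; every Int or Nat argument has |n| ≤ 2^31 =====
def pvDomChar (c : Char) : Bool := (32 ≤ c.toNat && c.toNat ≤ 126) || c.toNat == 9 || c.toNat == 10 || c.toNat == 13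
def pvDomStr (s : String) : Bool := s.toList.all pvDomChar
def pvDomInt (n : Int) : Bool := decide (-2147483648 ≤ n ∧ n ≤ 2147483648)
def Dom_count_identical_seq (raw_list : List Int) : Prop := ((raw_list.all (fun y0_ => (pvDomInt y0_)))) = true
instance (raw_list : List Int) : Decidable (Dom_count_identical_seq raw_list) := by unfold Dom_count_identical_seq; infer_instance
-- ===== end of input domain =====

-- B re-implements A's stateful last/count scan as a run-based pass (maximal runs of equal
-- consecutive elements, each contributing 1..L); same behaviour, alternative structure.

-- ===== PORT A =====
-- Python's `count` is only read after an iteration assigned it (last ≠ None guards that);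
-- the initial 0 here is never read before being overwritten.
def count_identical_seq (raw_list : List Int) : List Int :=
  ((PySem.List.enumerate raw_list 0).foldl
    (fun st p =>
      match st.1 with
      | some l =>
          if l = p.2 then (some p.2, st.2.1 + 1, PySem.List.pySetD st.2.2 p.1 (st.2.1 + 1))
          else (some p.2, (1 : Int), st.2.2)
      | none => (some p.2, (1 : Int), st.2.2))
    ((none : Option Int), (0 : Int), List.replicate raw_list.length (1 : Int))).2.2

-- ===== PORT B =====
-- inner while loop of B: length of the maximal prefix of the tail equal to x, and the rest
def pvTakeRun (x : Int) : List Int → Nat × List Int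
  | [] => (0, [])
  | y :: ys => if y = x then ((pvTakeRun x ys).1 + 1, (pvTakeRun x ys).2) else (0, y :: ys)

lemma pvTakeRun_len_le (x : Int) : ∀ (xs : List Int), (pvTakeRun x xs).2.length ≤ xs.length := by
  intro xs
  induction xs with
  | nil => simp [pvTakeRun]
  | cons y ys ih => by_cases h : y = x <;> simp [pvTakeRun, h] <;> omega

def count_identical_seq_alt : List Int → List Int
  | [] => []
  | x :: xs =>
      ((List.range ((pvTakeRun x xs).1 + 1)).map (fun (k : Nat) => (k : Int) + 1))
        ++ count_identical_seq_alt (pvTakeRun x xs).2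
termination_by xs => xs.length
decreasing_by simpa using Nat.lt_succ_of_le (pvTakeRun_len_le _ _)

-- ===== PRECONDITION & SPEC =====
def Spec_count_identical_seq (raw_list : List Int) (out : List Int) : Prop := out = count_identical_seq_alt raw_list
instance (raw_list : List Int) (out : List Int) : Decidable (Spec_count_identical_seq raw_list out) := by unfold Spec_count_identical_seq; infer_instance

-- ===== CLAIM (what is proved, stated in full; the proofs are below) =====
def Claim_equal_count_identical_seq : Prop := ∀ (raw_list : List Int), Dom_count_identical_seq raw_list → Spec_count_identical_seq raw_list (count_identical_seq raw_list)

-- ===== LEMMAS AND PROOFS =====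

-- functional spine of A's loop: the produced suffix given the carried (last, count) state
def fRun : List Int → Option Int → Int → List Int
  | [], _, _ => []
  | x :: xs, last, cnt =>
      if last = some x then (cnt + 1) :: fRun xs (some x) (cnt + 1)
      else 1 :: fRun xs (some x) 1

lemma set_append_len (pre : List Int) (y v : Int) (tl : List Int) :
    (pre ++ y :: tl).set pre.length v = pre ++ v :: tl := by
  induction pre with
  | nil => simp
  | cons a as ih => simp [ih]

lemma loopA : ∀ (xs pre : List Int) (last : Option Int) (cnt : Int),
    ((PySem.List.enumerate xs (pre.length : Int)).foldl
      (fun st p =>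
        match st.1 with
        | some l =>
            if l = p.2 then (some p.2, st.2.1 + 1, PySem.List.pySetD st.2.2 p.1 (st.2.1 + 1))
            else (some p.2, (1 : Int), st.2.2)
        | none => (some p.2, (1 : Int), st.2.2))
      (last, cnt, pre ++ List.replicate xs.length (1 : Int))).2.2
    = pre ++ fRun xs last cnt := by
  intro xs
  induction xs with
  | nil => intro pre last cnt; simp [PySem.List.enumerate_nil, fRun]
  | cons x xs ih =>
    intro pre last cnt
    rw [PySem.List.enumerate_cons]
    simp only [List.length_cons, List.replicate_succ, List.foldl_cons]
    match last with
    | none =>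
        have := ih (pre ++ [1]) (some x) 1
        simp only [List.length_append, List.length_cons, List.length_nil] at this
        simp only [fRun]
        push_cast at this ⊢
        rw [show pre ++ 1 :: List.replicate xs.length (1:Int)
              = (pre ++ [1]) ++ List.replicate xs.length (1:Int) by simp]
        simpa [fRun] using this
    | some l =>
        by_cases h : l = x
        · simp only [h]
          have hset : PySem.List.pySetD (pre ++ 1 :: List.replicate xs.length (1:Int))
              ((pre.length : Int)) (cnt + 1) = pre ++ (cnt + 1) :: List.replicate xs.length (1:Int) := by
            rw [PySem.List.pySetD_natCast, set_append_len]
          simp only [hset]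
          have := ih (pre ++ [cnt + 1]) (some x) (cnt + 1)
          simp only [List.length_append, List.length_cons, List.length_nil] at this
          push_cast at this ⊢
          rw [show pre ++ (cnt+1) :: List.replicate xs.length (1:Int)
                = (pre ++ [cnt+1]) ++ List.replicate xs.length (1:Int) by simp]
          simpa [fRun, h] using this
        · simp only [if_neg h]
          have := ih (pre ++ [1]) (some x) 1
          simp only [List.length_append, List.length_cons, List.length_nil] at this
          push_cast at this ⊢
          rw [show pre ++ 1 :: List.replicate xs.length (1:Int)
                = (pre ++ [1]) ++ List.replicate xs.length (1:Int) by simp]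
          have hne : ¬ (some l = some x) := by simpa using h
          simpa [fRun, hne] using this

lemma A_eq_fRun (xs : List Int) : count_identical_seq xs = fRun xs none 0 := by
  have := loopA xs [] none 0
  simpa [count_identical_seq] using this

lemma pvTakeRun_head (x : Int) : ∀ (xs : List Int), (pvTakeRun x xs).2.head? ≠ some x := by
  intro xs
  induction xs with
  | nil => simp [pvTakeRun]
  | cons y ys ih =>
      by_cases h : y = x
      · simpa [pvTakeRun, h] using ih
      · simp [pvTakeRun, h]

lemma fRun_head_ne (xs : List Int) (x : Int) (h : xs.head? ≠ some x) (c c' : Int) :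
    fRun xs (some x) c = fRun xs none c' := by
  cases xs with
  | nil => simp [fRun]
  | cons y ys =>
      have : ¬ ((some x : Option Int) = some y) := by
        simp only [List.head?_cons] at h; simp; intro e; exact h (by rw [e])
      simp [fRun, this]

lemma run_lemma (x : Int) : ∀ (xs : List Int) (cnt : Int),
    fRun xs (some x) cnt
      = (List.range (pvTakeRun x xs).1).map (fun (k : Nat) => cnt + (k : Int) + 1)
        ++ fRun (pvTakeRun x xs).2 (some x) cnt := by
  intro xs
  induction xs with
  | nil => intro cnt; simp [pvTakeRun, fRun]
  | cons y ys ih =>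
    intro cnt
    by_cases h : y = x
    · subst h
      simp only [pvTakeRun, fRun, if_true]
      rw [List.range_succ_eq_map]
      have hbase := ih (cnt + 1)
      have hswap : fRun (pvTakeRun y ys).2 (some y) (cnt + 1)
          = fRun (pvTakeRun y ys).2 (some y) cnt := by
        rcases h2 : (pvTakeRun y ys).2 with _ | ⟨z, zs⟩
        · simp [fRun]
        · have := pvTakeRun_head y ys
          rw [h2] at this
          have hz : ¬ ((some y : Option Int) = some z) := by
            simp at this ⊢; intro e; exact this e.symm
          simp [fRun, hz]
      rw [hbase, hswap]
      simp only [List.map_cons, List.map_map, List.cons_append]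
      congr 2
      · push_cast; ring
      · apply List.map_congr_left; intro k _
        simp only [Function.comp_apply]; push_cast; ring
    · simp [pvTakeRun, h, List.range_zero]

lemma fRun_eq_alt : ∀ (n : ℕ) (xs : List Int), xs.length ≤ n → ∀ (cnt : Int),
    fRun xs none cnt = count_identical_seq_alt xs := by
  intro n
  induction n with
  | zero =>
      intro xs h cnt
      have : xs = [] := List.length_eq_zero_iff.mp (Nat.le_zero.mp h)
      subst this; simp [fRun, count_identical_seq_alt]
  | succ n ih =>
    intro xs h cnt
    cases xs with
    | nil => simp [fRun, count_identical_seq_alt]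
    | cons x ys =>
      have hne : (none : Option Int) ≠ some x := by simp
      simp only [fRun, if_neg hne]
      rw [run_lemma x ys 1]
      have hrest : fRun (pvTakeRun x ys).2 (some x) 1
          = count_identical_seq_alt (pvTakeRun x ys).2 := by
        rw [fRun_head_ne _ x (pvTakeRun_head x ys) 1 0]
        exact ih _ (le_trans (pvTakeRun_len_le x ys) (Nat.lt_succ_iff.mp (by simpa using h))) 0
      rw [hrest, count_identical_seq_alt]
      rw [List.range_succ_eq_map]
      have hm : List.map (fun (k : Nat) => (1:Int) + (k:Int) + 1) (List.range (pvTakeRun x ys).1)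
          = List.map (fun (k : Nat) => (k:Int) + 1) (List.map Nat.succ (List.range (pvTakeRun x ys).1)) := by
        rw [List.map_map]
        apply List.map_congr_left; intro k _
        simp only [Function.comp_apply, Nat.succ_eq_add_one]; push_cast; ring
      rw [hm]; rfl

-- ===== VERDICT (by name: the statement is the Claim_ definition above) =====
theorem count_identical_seq_spec : Claim_equal_count_identical_seq := by
  intro xs _
  show count_identical_seq xs = count_identical_seq_alt xs
  rw [A_eq_fRun]
  exact fRun_eq_alt xs.length xs le_rfl 0
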